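-- pv_equiv track=rewrite | github.com/rossmassey/fetch-leetcode-problem | src/_func_parsing.py | _add_pass_to_functions
-- ===== SOURCE A (Python) =====
-- def _add_pass_to_functions(class_src: str) -> str:
--     lines = class_src.split('\n')
--     modified_lines = []
--
--     for i, line in enumerate(lines):
--         modified_lines.append(line)
--
--         if line.strip().startswith('def'):
--             # account for class offset
--             indent = 4 + len(line) - len(line.lstrip())
--             indented_pass = ' ' * indent + 'pass'
--             modified_lines.append(indented_pass)
--
--     return '\n'.join(modified_lines)
-- ===== SOURCE B (Python) =====
-- def _add_pass_to_functions(class_src: str) -> str: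
--     # Single streaming pass over the characters: a small DFA tracks, per line,
--     # the leading-whitespace count and whether the line starts (after the
--     # whitespace) with 'd','e','f'; a pass-line chunk is emitted at each line end.
--     out = []
--     ws = 0   # leading whitespace chars of the current line
--     st = 0   # 0: in leading ws, 1: saw 'd', 2: saw 'de', 3: saw 'def', 4: not a def line
--     for c in class_src:
--         if c == '\n':
--             if st == 3:
--                 out.append('\n' + ' ' * (4 + ws) + 'pass')
--             out.append('\n')
--             ws = 0
--             st = 0
--         else:
--             out.append(c)
--             if st == 0:
--                 if c.isspace():
--                     ws += 1
--                 elif c == 'd':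
--                     st = 1
--                 else:
--                     st = 4
--             elif st == 1:
--                 st = 2 if c == 'e' else 4
--             elif st == 2:
--                 st = 3 if c == 'f' else 4
--     if st == 3:
--         out.append('\n' + ' ' * (4 + ws) + 'pass')
--     return ''.join(out)
-- ===== Notes on version B (the rewrite author's own statement) =====
-- stated objective: alternative
-- what changed: Replaces the split-into-lines / per-line loop with appends / join pipeline by a single character-level streaming pass: a 5-state DFA tracks each line's leading-whitespace count and whether the line begins with the function-definition keyword, emitting the indented pass chunk at each line end, with no intermediate line list.
import Mathlib
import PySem

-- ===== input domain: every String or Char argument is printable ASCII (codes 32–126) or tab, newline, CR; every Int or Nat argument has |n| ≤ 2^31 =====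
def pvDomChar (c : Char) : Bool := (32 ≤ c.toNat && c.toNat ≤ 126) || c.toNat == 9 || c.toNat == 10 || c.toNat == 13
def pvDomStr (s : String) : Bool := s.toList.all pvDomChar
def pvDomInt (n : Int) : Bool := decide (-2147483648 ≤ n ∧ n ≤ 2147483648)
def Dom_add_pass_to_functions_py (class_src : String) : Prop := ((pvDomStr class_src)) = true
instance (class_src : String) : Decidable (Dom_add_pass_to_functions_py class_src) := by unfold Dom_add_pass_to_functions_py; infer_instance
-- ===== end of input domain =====

-- B replaces A's split-into-lines/per-line-append/join pipeline by a single
-- character-level streaming DFA pass (same output; alternative structure).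


-- ===== PORT A =====
-- literal port of A: split into lines, loop appending each line and, after a
-- line whose strip() starts with the def keyword, an indented pass line; join.
def add_pass_to_functions_py (class_src : String) : String :=
  let lines := PySem.Chars.splitOn class_src.toList ['\n']
  let modified_lines := (PySem.List.enumerate lines).foldl (fun acc p =>
    let acc1 := acc ++ [p.2]
    if PySem.Chars.startswith (PySem.Chars.strip p.2) ['d', 'e', 'f'] then
      acc1 ++ [PySem.List.pyRepeat [' ']
                 (4 + PySem.Chars.len p.2 - PySem.Chars.len (PySem.Chars.lstrip p.2))
               ++ ['p', 'a', 's', 's']]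
    else acc1) []
  String.ofList (PySem.Chars.join ['\n'] modified_lines)

-- ===== PORT B =====
-- port of Source B: one streaming pass; (ws, st) is the per-line DFA state.
def pvPassChunk (ws : Nat) : List Char :=
  '\n' :: (List.replicate (4 + ws) ' ' ++ ['p', 'a', 's', 's'])

def pvStep (s : Nat × Nat) (c : Char) : Nat × Nat :=
  if s.2 = 0 then
    if PySem.Chars.isspace c then (s.1 + 1, 0)
    else if c = 'd' then (s.1, 1) else (s.1, 4)
  else if s.2 = 1 then (s.1, if c = 'e' then 2 else 4)
  else if s.2 = 2 then (s.1, if c = 'f' then 3 else 4)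
  else s

def pvGo : List Char → Nat × Nat → List Char → List Char
  | [], s, out => out ++ (if s.2 = 3 then pvPassChunk s.1 else [])
  | c :: rest, s, out =>
      if c = '\n' then
        pvGo rest (0, 0) (out ++ (if s.2 = 3 then pvPassChunk s.1 else []) ++ ['\n'])
      else
        pvGo rest (pvStep s c) (out ++ [c])

def add_pass_to_functions_py_alt (class_src : String) : String :=
  String.ofList (pvGo class_src.toList (0, 0) [])

-- ===== PRECONDITION & SPEC =====
def Spec_add_pass_to_functions_py (class_src : String) (out : String) : Prop := out = add_pass_to_functions_py_alt class_src
instance (class_src : String) (out : String) : Decidable (Spec_add_pass_to_functions_py class_src out) := by unfold Spec_add_pass_to_functions_py; infer_instance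

-- ===== CLAIM (what is proved, stated in full; the proofs are below) =====
def Claim_equal_add_pass_to_functions_py : Prop := ∀ (class_src : String), Dom_add_pass_to_functions_py class_src → Spec_add_pass_to_functions_py class_src (add_pass_to_functions_py class_src)

-- ===== LEMMAS AND PROOFS =====

-- A's per-line entry: the line, then possibly the pass line (A's exact shapes).
def pvEntry (l : List Char) : List (List Char) :=
  l :: (if PySem.Chars.startswith (PySem.Chars.strip l) ['d', 'e', 'f'] then
          [PySem.List.pyRepeat [' ']
             (4 + PySem.Chars.len l - PySem.Chars.len (PySem.Chars.lstrip l))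
           ++ ['p', 'a', 's', 's']]
        else [])

-- split of a char list into its '\n'-separated pieces (spec for splitOn at sep '\n')
def pvLines : List Char → List (List Char)
  | [] => [[]]
  | c :: rest =>
      let ls := pvLines rest
      if c = '\n' then [] :: ls else (c :: ls.headI) :: ls.tail

-- the state the DFA reaches, from state 0, on the non-whitespace tail of a line
def pvTailState : List Char → Nat
  | [] => 0
  | c :: m1 =>
    if c = 'd' then
      match m1 with
      | [] => 1
      | c2 :: m2 =>
        if c2 = 'e' then
          match m2 with
          | [] => 2
          | c3 :: _ => if c3 = 'f' then 3 else 4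
        else 4
    else 4

theorem pvLines_ne_nil (l : List Char) : pvLines l ≠ [] := by
  cases l with
  | nil => simp [pvLines]
  | cons c rest => simp only [pvLines]; split <;> simp

theorem pvLines_no_nl (l : List Char) (h : '\n' ∉ l) : pvLines l = [l] := by
  induction l with
  | nil => rfl
  | cons c rest ih =>
      simp only [List.mem_cons, not_or] at h
      simp [pvLines, ih h.2, Ne.symm h.1]

theorem pvLines_append (l t : List Char) (h : '\n' ∉ l) :
    pvLines (l ++ '\n' :: t) = l :: pvLines t := by
  induction l with
  | nil => simp [pvLines]
  | cons c rest ih =>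
      simp only [List.mem_cons, not_or] at h
      simp [pvLines, ih h.2, Ne.symm h.1]

theorem pvSplitNl (cs : List Char) (h : '\n' ∈ cs) :
    ∃ l t, cs = l ++ '\n' :: t ∧ '\n' ∉ l := by
  induction cs with
  | nil => cases h
  | cons c rest ih =>
      by_cases hc : c = '\n'
      · exact ⟨[], rest, by simp [hc], by simp⟩
      · have hr : '\n' ∈ rest := by
          rcases List.mem_cons.mp h with h1 | h1
          · exact absurd h1.symm hc
          · exact h1
        obtain ⟨l, t, hEq, hl⟩ := ih hr
        refine ⟨c :: l, t, by simp [hEq], ?_⟩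
        simp only [List.mem_cons, not_or]
        exact ⟨fun e => hc e.symm, hl⟩

theorem pvSplitOn_go : ∀ (fuel : Nat) (l cur : List Char) (acc : List (List Char)),
    l.length < fuel →
    PySem.Chars.splitOn.go ['\n'] fuel l cur acc
      = acc.reverse ++ ((cur.reverse ++ (pvLines l).headI) :: (pvLines l).tail) := by
  intro fuel
  induction fuel with
  | zero => intro l cur acc h; omega
  | succ f ih =>
      intro l cur acc h
      cases l with
      | nil => simp [PySem.Chars.splitOn.go, pvLines]
      | cons c rest =>
          by_cases hc : c = '\n'
          · subst hc
            have : (['\n'] : List Char).isPrefixOf ('\n' :: rest) = true := by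
              simp [List.isPrefixOf]
            rw [PySem.Chars.splitOn.go, if_pos this]
            simp only [List.length_cons] at h
            simp only [List.length_cons, List.length_nil, List.drop_succ_cons, List.drop_zero]
            rw [ih rest [] (cur.reverse :: acc) (by omega)]
            cases hpl : pvLines rest with
            | nil => exact absurd hpl (pvLines_ne_nil rest)
            | cons a w => simp [pvLines, hpl]
          · have : (['\n'] : List Char).isPrefixOf (c :: rest) = false := by
              simp [List.isPrefixOf, Ne.symm hc]
            rw [PySem.Chars.splitOn.go, if_neg (by simp [this])]
            simp only [List.length_cons] at h
            rw [ih rest (c :: cur) acc (by omega)]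
            simp [pvLines, hc, List.append_assoc]

theorem pvSplitOn_eq (l : List Char) : PySem.Chars.splitOn l ['\n'] = pvLines l := by
  rw [PySem.Chars.splitOn, pvSplitOn_go (l.length + 1) l [] [] (by omega)]
  cases hpl : pvLines l with
  | nil => exact absurd hpl (pvLines_ne_nil l)
  | cons a w => simp

-- ---------- DFA facts ----------

theorem pvRun_fix (l : List Char) (ws st : Nat) (h : st = 3 ∨ st = 4) :
    l.foldl pvStep (ws, st) = (ws, st) := by
  induction l with
  | nil => rfl
  | cons c t ih =>
      have hstep : pvStep (ws, st) c = (ws, st) := by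
        rcases h with h | h <;> simp [pvStep, h]
      rw [List.foldl_cons, hstep, ih]

theorem pvRun_nonspace (c : Char) (t : List Char) (ws : Nat)
    (hsp : PySem.Chars.isspace c = false) :
    (c :: t).foldl pvStep (ws, 0) = (ws, pvTailState (c :: t)) := by
  rw [List.foldl_cons]
  by_cases hd : c = 'd'
  · subst hd
    have hstep : pvStep (ws, 0) 'd' = (ws, 1) := by simp [pvStep, hsp]
    rw [hstep]
    cases t with
    | nil => simp [pvTailState]
    | cons c2 t2 =>
        rw [List.foldl_cons]
        by_cases he : c2 = 'e'
        · subst he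
          have hstep2 : pvStep (ws, 1) 'e' = (ws, 2) := by simp [pvStep]
          rw [hstep2]
          cases t2 with
          | nil => simp [pvTailState]
          | cons c3 t3 =>
              rw [List.foldl_cons]
              by_cases hf : c3 = 'f'
              · subst hf
                have hstep3 : pvStep (ws, 2) 'f' = (ws, 3) := by simp [pvStep]
                rw [hstep3, pvRun_fix _ _ _ (Or.inl rfl)]
                simp [pvTailState]
              · have hstep3 : pvStep (ws, 2) c3 = (ws, 4) := by simp [pvStep, hf]
                rw [hstep3, pvRun_fix _ _ _ (Or.inr rfl)]
                simp [pvTailState, hf]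
        · have hstep2 : pvStep (ws, 1) c2 = (ws, 4) := by simp [pvStep, he]
          rw [hstep2, pvRun_fix _ _ _ (Or.inr rfl)]
          simp [pvTailState, he]
  · have hstep : pvStep (ws, 0) c = (ws, 4) := by simp [pvStep, hsp, hd]
    rw [hstep, pvRun_fix _ _ _ (Or.inr rfl)]
    simp [pvTailState, hd]

theorem pvRun0 (l : List Char) : ∀ ws : Nat,
    l.foldl pvStep (ws, 0)
      = (ws + (l.takeWhile PySem.Chars.isspace).length,
         pvTailState (l.dropWhile PySem.Chars.isspace)) := by
  induction l with
  | nil => intro ws; simp [pvTailState]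
  | cons c t ih =>
      intro ws
      by_cases hsp : PySem.Chars.isspace c = true
      · have hstep : pvStep (ws, 0) c = (ws + 1, 0) := by simp [pvStep, hsp]
        rw [List.foldl_cons, hstep, ih (ws + 1),
            List.takeWhile_cons_of_pos hsp, List.dropWhile_cons_of_pos hsp]
        simp [Prod.ext_iff]
        omega
      · rw [Bool.not_eq_true] at hsp
        rw [pvRun_nonspace c t ws hsp, List.takeWhile_cons_of_neg (by simp [hsp]),
            List.dropWhile_cons_of_neg (by simp [hsp])]
        simp

theorem pvTailState_eq3 (m : List Char) :
    pvTailState m = 3 ↔ (['d', 'e', 'f'] : List Char).isPrefixOf m = true := by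
  cases m with
  | nil => simp [pvTailState, List.isPrefixOf]
  | cons c m1 =>
    by_cases hd : c = 'd'
    · subst hd
      cases m1 with
      | nil => simp [pvTailState, List.isPrefixOf]
      | cons c2 m2 =>
        by_cases he : c2 = 'e'
        · subst he
          cases m2 with
          | nil => simp [pvTailState, List.isPrefixOf]
          | cons c3 r =>
            by_cases hf : c3 = 'f'
            · subst hf; simp [pvTailState, List.isPrefixOf]
            · simp [pvTailState, List.isPrefixOf, hf]
              exact fun e => hf e.symm
        · simp [pvTailState, List.isPrefixOf, he]
          exact fun e => absurd e.symm he
    · simp [pvTailState, List.isPrefixOf, hd]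
      exact fun e => absurd e.symm hd

theorem pvPrefix_pad (p : List Char) : ∀ (y s : List Char),
    (∀ c ∈ p, PySem.Chars.isspace c = false) → (∀ c ∈ s, PySem.Chars.isspace c = true) →
    p.isPrefixOf (y ++ s) = p.isPrefixOf y := by
  induction p with
  | nil => intro y s _ _; simp [List.isPrefixOf]
  | cons a p' ih =>
      intro y s hp hs
      cases y with
      | nil =>
          cases s with
          | nil => rfl
          | cons b s' =>
              have ha := hp a (by simp)
              have hb := hs b (by simp)
              have hab : (a == b) = false := by
                simp only [beq_eq_false_iff_ne, ne_eq]
                intro e; rw [e, hb] at ha; cases ha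
              simp [List.isPrefixOf, hab]
      | cons b y' =>
          simp only [List.cons_append, List.isPrefixOf]
          rw [ih y' s (fun c hc => hp c (by simp [hc])) hs]

theorem pvStartswith_rstrip (y : List Char) :
    (['d', 'e', 'f'] : List Char).isPrefixOf (PySem.Chars.rstrip y)
      = (['d', 'e', 'f'] : List Char).isPrefixOf y := by
  have hdecomp : y = PySem.Chars.rstrip y ++ (y.reverse.takeWhile PySem.Chars.isspace).reverse := by
    rw [PySem.Chars.rstrip]
    conv_lhs => rw [← List.reverse_reverse y,
      ← List.takeWhile_append_dropWhile (p := PySem.Chars.isspace) (l := y.reverse)]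
    rw [List.reverse_append]
  conv_rhs => rw [hdecomp]
  have hnsp : ∀ c ∈ (['d', 'e', 'f'] : List Char), PySem.Chars.isspace c = false := by
    intro c hc
    simp only [List.mem_cons, List.not_mem_nil, or_false] at hc
    rcases hc with rfl | rfl | rfl <;> rfl
  rw [pvPrefix_pad _ _ _ hnsp ?_]
  intro c hc
  rw [List.mem_reverse] at hc
  exact List.mem_takeWhile_imp hc

theorem pvIsdef_iff (l : List Char) :
    PySem.Chars.startswith (PySem.Chars.strip l) ['d', 'e', 'f'] = true
      ↔ pvTailState (l.dropWhile PySem.Chars.isspace) = 3 := by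
  rw [PySem.Chars.startswith, PySem.Chars.strip, PySem.Chars.lstrip,
      pvStartswith_rstrip, pvTailState_eq3]

-- ---------- pvGo stepping ----------

theorem pvGo_no_nl (l : List Char) : ∀ (s : Nat × Nat) (out : List Char), '\n' ∉ l →
    pvGo l s out
      = out ++ l ++ (if (l.foldl pvStep s).2 = 3 then pvPassChunk (l.foldl pvStep s).1 else []) := by
  induction l with
  | nil => intro s out _; simp [pvGo]
  | cons c rest ih =>
      intro s out h
      simp only [List.mem_cons, not_or] at h
      rw [pvGo, if_neg (Ne.symm h.1)]
      rw [ih (pvStep s c) (out ++ [c]) h.2, List.foldl_cons]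
      simp [List.append_assoc]

theorem pvGo_mid (l : List Char) : ∀ (rest : List Char) (s : Nat × Nat) (out : List Char), '\n' ∉ l →
    pvGo (l ++ '\n' :: rest) s out
      = pvGo rest (0, 0)
          (out ++ l ++ (if (l.foldl pvStep s).2 = 3 then pvPassChunk (l.foldl pvStep s).1 else []) ++ ['\n']) := by
  induction l with
  | nil => intro rest s out _; rw [List.nil_append, pvGo, if_pos rfl]; simp
  | cons c t ih =>
      intro rest s out h
      simp only [List.mem_cons, not_or] at h
      rw [List.cons_append, pvGo, if_neg (Ne.symm h.1)]
      rw [ih rest (pvStep s c) (out ++ [c]) h.2, List.foldl_cons]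
      simp [List.append_assoc]

-- ---------- join / flatMap plumbing ----------

theorem pvJoin_cons (a : List Char) (w : List (List Char)) (hw : w ≠ []) :
    PySem.Chars.join ['\n'] (a :: w) = a ++ '\n' :: PySem.Chars.join ['\n'] w := by
  cases w with
  | nil => exact absurd rfl hw
  | cons b t => rw [PySem.Chars.join_cons_cons]; simp

theorem pvFlat_ne_nil (ls : List (List Char)) (h : ls ≠ []) : ls.flatMap pvEntry ≠ [] := by
  cases ls with
  | nil => exact absurd rfl h
  | cons a t => simp [pvEntry]

theorem pvAfold (ls : List (Int × List Char)) (acc : List (List Char)) :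
    ls.foldl (fun acc p =>
      let acc1 := acc ++ [p.2]
      if PySem.Chars.startswith (PySem.Chars.strip p.2) ['d', 'e', 'f'] then
        acc1 ++ [PySem.List.pyRepeat [' ']
                   (4 + PySem.Chars.len p.2 - PySem.Chars.len (PySem.Chars.lstrip p.2))
                 ++ ['p', 'a', 's', 's']]
      else acc1) acc
      = acc ++ ls.flatMap (fun p => pvEntry p.2) := by
  induction ls generalizing acc with
  | nil => simp
  | cons q t ih =>
      rw [List.foldl_cons, List.flatMap_cons, ih]
      simp only [pvEntry]
      split <;> simp

theorem pvFlat_enumerate (ls : List (List Char)) :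
    (PySem.List.enumerate ls 0).flatMap (fun p => pvEntry p.2) = ls.flatMap pvEntry := by
  conv_rhs => rw [← PySem.List.map_snd_enumerate ls 0]
  exact (List.flatMap_map (fun x => x.2) pvEntry (PySem.List.enumerate ls 0)).symm

-- length arithmetic for the pass-line indent (A computes it via Int lengths)
theorem pvIndent_toNat (l : List Char) :
    (4 + (l.length : Int) - ((l.dropWhile PySem.Chars.isspace).length : Int)).toNat
      = 4 + (l.takeWhile PySem.Chars.isspace).length := by
  have h : (l.takeWhile PySem.Chars.isspace).length + (l.dropWhile PySem.Chars.isspace).length = l.length := by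
    conv_rhs => rw [← List.takeWhile_append_dropWhile (p := PySem.Chars.isspace) (l := l)]
    exact (List.length_append ..).symm
  omega

-- the pass line A appends = the pass part of B's chunk for that line
theorem pvPassLine_eq (l : List Char) :
    PySem.List.pyRepeat [' '] (4 + PySem.Chars.len l - PySem.Chars.len (PySem.Chars.lstrip l))
        ++ ['p', 'a', 's', 's']
      = List.replicate (4 + (l.takeWhile PySem.Chars.isspace).length) ' ' ++ ['p', 'a', 's', 's'] := by
  rw [PySem.List.pyRepeat_singleton]
  rw [PySem.Chars.len, PySem.Chars.len, PySem.Chars.lstrip, pvIndent_toNat]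

-- ---------- main B characterisation ----------

theorem pvMain : ∀ (n : Nat) (cs out : List Char), cs.length ≤ n →
    pvGo cs (0, 0) out = out ++ PySem.Chars.join ['\n'] ((pvLines cs).flatMap pvEntry) := by
  intro n
  induction n with
  | zero =>
      intro cs out h
      have hn : cs = [] := List.eq_nil_of_length_eq_zero (Nat.le_zero.mp h)
      subst hn
      have hj : PySem.Chars.join ['\n'] ((pvLines []).flatMap pvEntry) = [] := by decide
      rw [hj, List.append_nil]
      simp [pvGo]
  | succ n ih =>
      intro cs out h
      by_cases hnl : '\n' ∈ cs
      · obtain ⟨l, t, rfl, hl⟩ := pvSplitNl cs hnl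
        have hlen : t.length ≤ n := by simp [List.length_append] at h; omega
        rw [pvGo_mid l t (0, 0) out hl, ih t _ hlen, pvLines_append l t hl, List.flatMap_cons]
        have hw : (pvLines t).flatMap pvEntry ≠ [] := pvFlat_ne_nil _ (pvLines_ne_nil t)
        rw [pvRun0 l 0]
        simp only [pvEntry, Nat.zero_add]
        by_cases hdef : pvTailState (l.dropWhile PySem.Chars.isspace) = 3
        · rw [if_pos hdef, if_pos ((pvIsdef_iff l).mpr hdef)]
          simp only [List.cons_append, List.nil_append]
          rw [pvJoin_cons _ _ (by simp), pvJoin_cons _ _ hw, pvPassLine_eq]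
          simp [pvPassChunk, List.append_assoc]
        · rw [if_neg hdef, if_neg (fun hc => hdef ((pvIsdef_iff l).mp hc))]
          simp only [List.cons_append, List.nil_append]
          rw [pvJoin_cons _ _ hw]
          simp [List.append_assoc]
      · rw [pvGo_no_nl cs (0, 0) out hnl, pvLines_no_nl cs hnl, pvRun0 cs 0]
        simp only [List.flatMap_cons, List.flatMap_nil, List.append_nil, pvEntry, Nat.zero_add]
        by_cases hdef : pvTailState (cs.dropWhile PySem.Chars.isspace) = 3
        · rw [if_pos hdef, if_pos ((pvIsdef_iff cs).mpr hdef)]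
          rw [pvJoin_cons _ _ (by simp), PySem.Chars.join_singleton, pvPassLine_eq]
          simp [pvPassChunk, List.append_assoc]
        · rw [if_neg hdef, if_neg (fun hc => hdef ((pvIsdef_iff cs).mp hc))]
          rw [PySem.Chars.join_singleton]
          simp

-- ===== VERDICT (by name: the statement is the Claim_ definition above) =====
theorem add_pass_to_functions_py_spec : Claim_equal_add_pass_to_functions_py := by
  intro s _
  unfold Spec_add_pass_to_functions_py add_pass_to_functions_py add_pass_to_functions_py_alt
  simp only []
  rw [pvAfold]
  rw [pvMain s.toList.length s.toList [] le_rfl]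
  rw [List.nil_append, List.nil_append, pvSplitOn_eq, pvFlat_enumerate]
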